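-- pv_equiv track=rewrite | github.com/Gelbpunkt/IdleRPG | cogs/gambling/__init__.py | calc_aces
-- ===== SOURCE A (Python) =====
-- def calc_aces(value, aces):
--     missing = 21 - value
--     num_11 = 0
--     num_1 = 0
--     for i in range(aces):
--         if missing < 11:
--             num_1 += 1
--             missing -= 1
--         else:
--             num_11 += 1
--             missing -= 11
--     return num_11 * 11 + num_1
-- ===== SOURCE B (Python) =====
-- def calc_aces(value, aces):
--     a = max(aces, 0)
--     num_11 = max(0, min(a, (10 - value) // 11 + 1))
--     return a + 10 * num_11
-- ===== Notes on version B (the rewrite author's own statement) =====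
-- stated objective: simpler
-- what changed: Replaces the per-ace loop with a closed-form count of aces valued 11 (floor-division arithmetic), since the high aces all come first.
import Mathlib
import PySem

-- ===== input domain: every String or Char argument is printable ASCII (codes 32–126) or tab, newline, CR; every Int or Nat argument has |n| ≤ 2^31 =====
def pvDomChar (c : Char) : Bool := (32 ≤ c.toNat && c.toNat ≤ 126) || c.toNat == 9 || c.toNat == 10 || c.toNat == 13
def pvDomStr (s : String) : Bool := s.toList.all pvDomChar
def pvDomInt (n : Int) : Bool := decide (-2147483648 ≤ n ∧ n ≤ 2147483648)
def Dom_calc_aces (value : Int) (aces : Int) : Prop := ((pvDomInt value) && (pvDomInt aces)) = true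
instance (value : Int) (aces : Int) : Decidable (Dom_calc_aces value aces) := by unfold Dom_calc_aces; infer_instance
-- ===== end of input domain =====

-- B replaces A's per-ace loop by a closed-form count of aces valued 11 (simpler, no loop).

-- ===== PORT A =====
-- state (missing, num_11, num_1); one loop iteration of A
def calcAcesStep (st : Int × Int × Int) : Int × Int × Int :=
  if st.1 < 11 then (st.1 - 1, st.2.1, st.2.2 + 1) else (st.1 - 11, st.2.1 + 1, st.2.2)

def calc_aces (value : Int) (aces : Int) : Int :=
  let missing := 21 - value
  let st := (PySem.List.pyRange 0 aces 1).foldl (fun st _ => calcAcesStep st) (missing, 0, 0)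
  st.2.1 * 11 + st.2.2

-- ===== PORT B =====
def calc_aces_alt (value : Int) (aces : Int) : Int :=
  let a := max aces 0
  let num11 := max 0 (min a (PySem.Int.floordiv (10 - value) 11 + 1))
  a + 10 * num11

-- ===== PRECONDITION & SPEC =====
def Spec_calc_aces (value : Int) (aces : Int) (out : Int) : Prop := out = calc_aces_alt value aces
instance (value : Int) (aces : Int) (out : Int) : Decidable (Spec_calc_aces value aces out) := by unfold Spec_calc_aces; infer_instance

-- ===== CLAIM (what is proved, stated in full; the proofs are below) =====
def Claim_equal_calc_aces : Prop := ∀ (value : Int) (aces : Int), Dom_calc_aces value aces → Spec_calc_aces value aces (calc_aces value aces)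

-- ===== LEMMAS AND PROOFS =====

-- folding A's step over any list only depends on the list's length
def calcAcesIter : Nat → Int × Int × Int → Int × Int × Int
  | 0, st => st
  | n + 1, st => calcAcesIter n (calcAcesStep st)

theorem foldl_calcAcesStep (l : List Int) (st : Int × Int × Int) :
    l.foldl (fun st _ => calcAcesStep st) st = calcAcesIter l.length st := by
  induction l generalizing st with
  | nil => rfl
  | cons x xs ih => simp [List.foldl, calcAcesIter, ih]

-- closed form for the loop's final score, by induction on the iteration count
theorem calcAcesIter_score (n : Nat) (m a b : Int) :
    (calcAcesIter n (m, a, b)).2.1 * 11 + (calcAcesIter n (m, a, b)).2.2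
      = a * 11 + b + n + 10 * min (n : Int) (max 0 ((m - 11) / 11 + 1)) := by
  induction n generalizing m a b with
  | zero => simp [calcAcesIter]
  | succ n ih =>
    have hstep : calcAcesIter (n+1) (m, a, b) = calcAcesIter n (calcAcesStep (m, a, b)) := rfl
    rw [hstep]
    have hdiv : m - 11 = 11 * ((m - 11) / 11) + (m - 11) % 11 := (Int.ediv_add_emod _ _).symm
    have hlt : (m - 11) % 11 < 11 := Int.emod_lt_of_pos _ (by norm_num)
    have hge : 0 ≤ (m - 11) % 11 := Int.emod_nonneg _ (by norm_num)
    have hdiv2 : m - 22 = 11 * ((m - 22) / 11) + (m - 22) % 11 := (Int.ediv_add_emod _ _).symm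
    have hlt2 : (m - 22) % 11 < 11 := Int.emod_lt_of_pos _ (by norm_num)
    have hge2 : 0 ≤ (m - 22) % 11 := Int.emod_nonneg _ (by norm_num)
    by_cases hm : m < 11
    · have : calcAcesStep (m, a, b) = (m - 1, a, b + 1) := by simp [calcAcesStep, hm]
      rw [this, ih]
      have hdiv3 : m - 12 = 11 * ((m - 12) / 11) + (m - 12) % 11 := (Int.ediv_add_emod _ _).symm
      have hlt3 : (m - 12) % 11 < 11 := Int.emod_lt_of_pos _ (by norm_num)
      have hge3 : 0 ≤ (m - 12) % 11 := Int.emod_nonneg _ (by norm_num)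
      push_cast
      omega
    · have : calcAcesStep (m, a, b) = (m - 11, a + 1, b) := by simp [calcAcesStep, hm]
      rw [this, ih]
      push_cast
      omega

theorem calc_aces_eq_alt (value aces : Int) : calc_aces value aces = calc_aces_alt value aces := by
  show (PySem.List.pyRange 0 aces 1).foldl (fun st _ => calcAcesStep st) (21 - value, 0, 0) |>.2.1 * 11 + _ = _
  rw [foldl_calcAcesStep, PySem.List.length_pyRange_one, calcAcesIter_score]
  simp only [calc_aces_alt]
  have hfd : PySem.Int.floordiv (10 - value) 11 = (10 - value) / 11 :=
    PySem.Int.floordiv_eq_ediv_of_pos (by norm_num : (0:Int) < 11)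
  rw [hfd]
  have h21 : (21 : Int) - value - 11 = 10 - value := by ring
  rw [h21]
  have htn : ((aces - 0).toNat : Int) = max aces 0 := by omega
  rw [htn]
  omega

-- ===== VERDICT (by name: the statement is the Claim_ definition above) =====
theorem calc_aces_spec : Claim_equal_calc_aces := by
  intro value aces _
  exact calc_aces_eq_alt value aces
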